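-- pv_equiv track=rewrite | github.com/GuBenf/Codici-Lab-Pisa-Public | plot_utils_pisa_gu.py | groupwise
-- ===== SOURCE A (Python) =====
-- def groupwise(iterable, n):
--     """Returns items from the iterable in groups of n, i.e. groupwise('abcdef', 3) -> 'abc', 'def'."""
--     i = iter(iterable)
--     def get():
--         items = []
--         for _ in range(n):
--             try:
--                 items.append(next(i))
--             except StopIteration:
--                 break
--         return items
--     r = get()
--     while len(r):
--         yield r
--         r = get()
-- ===== SOURCE B (Python) =====
-- def groupwise(iterable, n):
--     """Returns items from the iterable in groups of n, i.e. groupwise('abcdef', 3) -> 'abc', 'def'."""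
--     if n <= 0:
--         return
--     buf = []
--     for x in iterable:
--         buf.append(x)
--         if len(buf) == n:
--             yield buf
--             buf = []
--     if buf:
--         yield buf
-- ===== Notes on version B (the rewrite author's own statement) =====
-- stated objective: simpler
-- what changed: Single flat pass that accumulates a running buffer and emits it when it reaches n (plus a leftover flush), replacing A's inner get() helper that pulls n items per group from an iterator with try/except StopIteration.
import Mathlib
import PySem

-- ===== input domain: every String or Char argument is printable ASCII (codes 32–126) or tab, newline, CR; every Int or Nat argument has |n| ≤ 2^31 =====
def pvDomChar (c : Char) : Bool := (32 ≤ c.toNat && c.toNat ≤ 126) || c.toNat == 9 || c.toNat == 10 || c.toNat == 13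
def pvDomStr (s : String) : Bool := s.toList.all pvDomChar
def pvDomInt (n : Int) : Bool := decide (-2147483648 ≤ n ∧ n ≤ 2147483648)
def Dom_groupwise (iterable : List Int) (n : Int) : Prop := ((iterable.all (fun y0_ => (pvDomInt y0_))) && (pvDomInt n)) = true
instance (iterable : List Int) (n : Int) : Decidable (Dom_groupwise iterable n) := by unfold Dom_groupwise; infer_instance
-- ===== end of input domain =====

-- B replaces A's per-group inner get()/next pull loop by one flat buffered pass (simpler decomposition, same cost).

-- ===== PORT A =====
-- A's inner helper get(): pulls up to n items off the iterator (the `for _ in range(n)` loop does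
-- n.toNat iterations; the `except StopIteration: break` is the empty-list cases). Returns the items
-- pulled together with the remaining iterator state.
def pvGet : Nat → List Int → List Int × List Int
  | 0, xs => ([], xs)
  | _ + 1, [] => ([], [])
  | k + 1, x :: xs =>
    let p := pvGet k xs
    (x :: p.1, p.2)

-- termination fact for A's while-loop (cited by pvLoop's decreasing_by)
theorem pvGet_shrink : ∀ (k : Nat) (xs : List Int), (pvGet k xs).1 ≠ [] → (pvGet k xs).2.length < xs.length := by
  have hle : ∀ (k : Nat) (xs : List Int), (pvGet k xs).2.length ≤ xs.length := by
    intro k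
    induction k with
    | zero => intro xs; simp [pvGet]
    | succ k ih =>
      intro xs
      cases xs with
      | nil => simp [pvGet]
      | cons x xs => simpa [pvGet] using Nat.le_succ_of_le (ih xs)
  intro k xs h
  match k, xs with
  | 0, xs => simp [pvGet] at h
  | k + 1, [] => simp [pvGet] at h
  | k + 1, x :: xs =>
    simpa [pvGet, Nat.lt_succ_iff] using hle k xs

-- A's `r = get(); while len(r): yield r; r = get()` loop
def pvLoop (k : Nat) (xs : List Int) : List (List Int) :=
  let p := pvGet k xs
  if h : p.1 = [] then [] else p.1 :: pvLoop k p.2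
termination_by xs.length
decreasing_by exact pvGet_shrink k xs h

def groupwise (iterable : List Int) (n : Int) : List (List Int) := pvLoop n.toNat iterable

-- ===== PORT B =====
-- B's loop body: buf.append(x); if len(buf) == n: yield buf; buf = []
def pvStep (n : Int) (st : List (List Int) × List Int) (x : Int) : List (List Int) × List Int :=
  let buf := st.2 ++ [x]
  if (buf.length : Int) = n then (st.1 ++ [buf], []) else (st.1, buf)

def groupwise_alt (iterable : List Int) (n : Int) : List (List Int) :=
  if n ≤ 0 then []
  else
    let st := iterable.foldl (pvStep n) ([], [])
    if st.2 = [] then st.1 else st.1 ++ [st.2]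

-- ===== PRECONDITION & SPEC =====
def Spec_groupwise (iterable : List Int) (n : Int) (out : List (List Int)) : Prop := out = groupwise_alt iterable n
instance (iterable : List Int) (n : Int) (out : List (List Int)) : Decidable (Spec_groupwise iterable n out) := by unfold Spec_groupwise; infer_instance

-- ===== CLAIM (what is proved, stated in full; the proofs are below) =====
def Claim_equal_groupwise : Prop := ∀ (iterable : List Int) (n : Int), Dom_groupwise iterable n → Spec_groupwise iterable n (groupwise iterable n)

-- ===== LEMMAS AND PROOFS =====

theorem pvGet_all (buf : List Int) : ∀ (k : Nat), buf.length ≤ k → pvGet k buf = (buf, []) := by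
  induction buf with
  | nil => intro k _; cases k <;> simp [pvGet]
  | cons x xs ih =>
    intro k hk
    cases k with
    | zero => simp at hk
    | succ k => simp only [pvGet, ih k (by simpa using hk)]

theorem pvGet_exact (buf rest : List Int) : ∀ (k : Nat), buf.length = k → pvGet k (buf ++ rest) = (buf, rest) := by
  induction buf with
  | nil => intro k hk; simp at hk; subst hk; simp [pvGet]
  | cons x xs ih =>
    intro k hk
    cases k with
    | zero => simp at hk
    | succ k => simp only [List.cons_append, pvGet, ih k (by simpa using hk)]

theorem pvLoop_nil (k : Nat) : pvLoop k [] = [] := by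
  rw [pvLoop]
  cases k <;> simp [pvGet]

-- the buffered fold, flushed, computes A's chunk loop
theorem pvInv (n : Int) (hn : 1 ≤ n) :
    ∀ (xs : List Int) (acc : List (List Int)) (buf : List Int), (buf.length : Int) < n →
      (let st := xs.foldl (pvStep n) (acc, buf);
       if st.2 = [] then st.1 else st.1 ++ [st.2]) = acc ++ pvLoop n.toNat (buf ++ xs) := by
  intro xs
  induction xs with
  | nil =>
    intro acc buf hb
    simp only [List.foldl_nil, List.append_nil]
    rw [pvLoop, pvGet_all buf n.toNat (by omega)]
    by_cases h : buf = []
    · simp [h, pvLoop_nil]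
    · simp [h, pvLoop_nil]
  | cons x xs ih =>
    intro acc buf hb
    simp only [List.foldl_cons, pvStep]
    by_cases h : ((buf ++ [x]).length : Int) = n
    · simp only [h, if_true]
      rw [ih (acc ++ [buf ++ [x]]) [] (by simpa using hn)]
      have hne : buf ++ [x] ≠ [] := by simp
      have : pvLoop n.toNat (buf ++ x :: xs) = (buf ++ [x]) :: pvLoop n.toNat xs := by
        have hx : buf ++ x :: xs = (buf ++ [x]) ++ xs := by simp
        rw [hx, pvLoop, pvGet_exact (buf ++ [x]) xs n.toNat (by omega)]
        simp [hne]
      rw [this]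
      simp
    · simp only [h, if_false]
      rw [ih acc (buf ++ [x]) (by simp at h ⊢; omega)]
      simp

-- ===== VERDICT (by name: the statement is the Claim_ definition above) =====
theorem groupwise_spec : Claim_equal_groupwise := by
  intro iterable n _
  unfold Spec_groupwise groupwise groupwise_alt
  by_cases hn : n ≤ 0
  · have : n.toNat = 0 := by omega
    rw [this, if_pos hn, pvLoop]
    simp [pvGet]
  · rw [if_neg hn]
    have := pvInv n (by omega) iterable [] [] (by simp; omega)
    rw [show pvLoop n.toNat iterable = [] ++ pvLoop n.toNat ([] ++ iterable) by simp]
    exact this.symm
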